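-- pv_equiv track=rewrite | github.com/pypi-data/pypi-mirror-399 | packages/robotframework-agent/robotframework_agent-0.0.2-py3-none-any.whl/Agent/platforms/locators/android_locator.py | _escape_xpath
-- ===== SOURCE A (Python) =====
-- def _escape_xpath(value: str) -> str:
--     """
--     Args:
--         value: "It's a test"
--     Returns:
--         concat('It', \"'\", 's a test') or 'simple'
--     """
--     if "'" not in value:
--         return f"'{value}'"
--     if '"' not in value:
--         return f'"{value}"'
--
--     parts = []
--     current = ""
--     for char in value:
--         if char == "'":
--             if current:
--                 parts.append(f"'{current}'")
--                 current = ""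
--             parts.append("\"'\"")
--         else:
--             current += char
--     if current:
--         parts.append(f"'{current}'")
--
--     return f"concat({', '.join(parts)})"
-- ===== SOURCE B (Python) =====
-- def _escape_xpath(value: str) -> str:
--     if "'" not in value:
--         return f"'{value}'"
--     if '"' not in value:
--         return f'"{value}"'
--     tokens = []
--     for i, part in enumerate(value.split("'")):
--         if i > 0:
--             tokens.append("\"'\"")
--         if part:
--             tokens.append(f"'{part}'")
--     return f"concat({', '.join(tokens)})"
-- ===== Notes on version B (the rewrite author's own statement) =====
-- stated objective: simpler
-- what changed: Replaced A's character-by-character accumulator loop (with in-loop flushing of the current segment) by splitting the value on single quotes followed by one enumerate pass that emits a quote token per boundary and a quoted token per non-empty segment.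
import Mathlib
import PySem

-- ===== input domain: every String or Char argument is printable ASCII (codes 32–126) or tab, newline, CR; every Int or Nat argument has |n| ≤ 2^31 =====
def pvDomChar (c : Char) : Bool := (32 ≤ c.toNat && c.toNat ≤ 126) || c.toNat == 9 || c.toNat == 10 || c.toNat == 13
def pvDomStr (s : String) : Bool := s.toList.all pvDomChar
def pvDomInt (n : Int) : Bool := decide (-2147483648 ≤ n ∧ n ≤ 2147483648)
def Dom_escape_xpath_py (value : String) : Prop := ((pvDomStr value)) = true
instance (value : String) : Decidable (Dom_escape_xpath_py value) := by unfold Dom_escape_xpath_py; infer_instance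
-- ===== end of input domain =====

-- B replaces A's char-by-char accumulator loop by split("'") + one enumerate pass
-- that interleaves quote tokens at the boundaries (objective: simpler). A is total.

-- ===== PORT A =====

-- f"'{current}'" as a char list
def aQuoted (cs : List Char) : List Char := '\'' :: cs ++ ['\'']

-- the token "\"'\""
def aQuoteTok : List Char := ['"', '\'', '"']

-- the 'for char in value' loop: state (parts, current)
def aLoop : List Char → List (List Char) → List Char → (List (List Char) × List Char)
  | [], parts, current => (parts, current)
  | c :: rest, parts, current =>
    if c = '\'' then
      aLoop rest ((parts ++ (if current ≠ [] then [aQuoted current] else [])) ++ [aQuoteTok]) []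
    else
      aLoop rest parts (current ++ [c])

def escape_xpath_py (value : String) : String :=
  if PySem.Str.isIn "'" value = false then
    String.ofList ('\'' :: value.toList ++ ['\''])
  else if PySem.Str.isIn "\"" value = false then
    String.ofList ('"' :: value.toList ++ ['"'])
  else
    let st := aLoop value.toList [] []
    let parts := st.1 ++ (if st.2 ≠ [] then [aQuoted st.2] else [])
    String.ofList ("concat(".toList ++ PySem.Chars.join [',', ' '] parts ++ [')'])

-- ===== PORT B =====

-- the enumerate loop: i is the running index; appends per Source B's two ifs
def bTokens : Nat → List (List Char) → List (List Char)
  | _, [] => []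
  | i, p :: rest =>
    ((if i > 0 then [aQuoteTok] else []) ++ (if p ≠ [] then [aQuoted p] else [])) ++ bTokens (i + 1) rest

def escape_xpath_py_alt (value : String) : String :=
  if PySem.Str.isIn "'" value = false then
    String.ofList ('\'' :: value.toList ++ ['\''])
  else if PySem.Str.isIn "\"" value = false then
    String.ofList ('"' :: value.toList ++ ['"'])
  else
    let tokens := bTokens 0 (value.toList.splitOn '\'')
    String.ofList ("concat(".toList ++ PySem.Chars.join [',', ' '] tokens ++ [')'])

-- ===== PRECONDITION & SPEC =====
def Spec_escape_xpath_py (value : String) (out : String) : Prop := out = escape_xpath_py_alt value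
instance (value : String) (out : String) : Decidable (Spec_escape_xpath_py value out) := by unfold Spec_escape_xpath_py; infer_instance

-- ===== CLAIM (what is proved, stated in full; the proofs are below) =====
def Claim_equal_escape_xpath_py : Prop := ∀ (value : String), Dom_escape_xpath_py value → Spec_escape_xpath_py value (escape_xpath_py value)

-- ===== LEMMAS AND PROOFS =====

-- tokens A's loop leaves: emit for the leading segment merged with `cur`, then one
-- quote token per remaining boundary
def pvEmit (cs : List Char) : List (List Char) := if cs ≠ [] then [aQuoted cs] else []

def pvCombine (cur : List Char) : List (List Char) → List (List Char)
  | [] => pvEmit cur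
  | s0 :: rest => pvEmit (cur ++ s0) ++ rest.flatMap (fun p => aQuoteTok :: pvEmit p)

theorem aLoop_combine (cs : List Char) : ∀ (parts : List (List Char)) (cur : List Char),
    (aLoop cs parts cur).1 ++ (if (aLoop cs parts cur).2 ≠ [] then [aQuoted (aLoop cs parts cur).2] else [])
      = parts ++ pvCombine cur (cs.splitOnP (· == '\'')) := by
  induction cs with
  | nil =>
    intro parts cur
    simp [aLoop, List.splitOnP_nil, pvCombine, pvEmit]
  | cons c rest ih =>
    intro parts cur
    rw [List.splitOnP_cons]
    by_cases hc : c = '\''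
    · subst hc
      simp only [aLoop, ih, beq_self_eq_true, if_pos]
      rcases h : rest.splitOnP (· == '\'') with _ | ⟨s0, rs⟩
      · exact absurd h (List.splitOnP_ne_nil _ _)
      · simp [pvCombine, pvEmit, List.flatMap_cons]
    · have hbeq : (c == '\'') = false := by simp [hc]
      simp only [aLoop, if_neg hc, ih, hbeq, Bool.false_eq_true, if_false]
      rcases h : rest.splitOnP (· == '\'') with _ | ⟨s0, rs⟩
      · exact absurd h (List.splitOnP_ne_nil _ _)
      · simp [pvCombine, pvEmit, List.modifyHead]

theorem bTokens_pos (ps : List (List Char)) : ∀ i : Nat, 0 < i →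
    bTokens i ps = ps.flatMap (fun p => aQuoteTok :: pvEmit p) := by
  induction ps with
  | nil => intro i _; simp [bTokens]
  | cons p rest ih =>
    intro i hi
    simp [bTokens, hi, ih (i + 1) (Nat.succ_pos i), pvEmit, List.flatMap_cons]

theorem bTokens_eq_combine (ps : List (List Char)) (h : ps ≠ []) :
    bTokens 0 ps = pvCombine [] ps := by
  rcases ps with _ | ⟨s0, rest⟩
  · exact absurd rfl h
  · simp [bTokens, pvCombine, pvEmit, bTokens_pos rest 1 Nat.one_pos]

-- ===== VERDICT (by name: the statement is the Claim_ definition above) =====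
theorem escape_xpath_py_spec : Claim_equal_escape_xpath_py := by
  intro value _
  unfold Spec_escape_xpath_py escape_xpath_py escape_xpath_py_alt
  split_ifs with h1 h2
  · rfl
  · rfl
  · have hA := aLoop_combine value.toList [] []
    simp only [List.nil_append] at hA
    show String.ofList _ = String.ofList _
    rw [hA, List.splitOn, bTokens_eq_combine _ (List.splitOnP_ne_nil _ _)]
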